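-- pv_equiv track=rewrite | github.com/wkdal1433/nurse-schedule-optimizer | backend/app/services/score_breakdown_service.py | _check_consecutive_night_shifts
-- ===== SOURCE A (Python) =====
-- from typing import Dict, List, Any, Tuple
--
-- def _check_consecutive_night_shifts(schedule: List[List[int]], emp_idx: int) -> int:
--     """연속 야간근무 계산"""
--     max_consecutive_night = 0
--     current_consecutive_night = 0
--
--     for day_schedule in schedule:
--         if day_schedule[emp_idx] == 2:  # 야간 근무
--             current_consecutive_night += 1
--             max_consecutive_night = max(max_consecutive_night, current_consecutive_night)
--         else:
--             current_consecutive_night = 0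
--
--     return max_consecutive_night
-- ===== SOURCE B (Python) =====
-- def _check_consecutive_night_shifts(schedule, emp_idx):
--     """Run-length encode the employee's column, then take the longest run of 2s."""
--     col = [day_schedule[emp_idx] for day_schedule in schedule]
--     runs = []  # list of [value, length] for maximal runs of equal values
--     for v in col:
--         if runs and runs[-1][0] == v:
--             runs[-1][1] += 1
--         else:
--             runs.append([v, 1])
--     return max((n for v, n in runs if v == 2), default=0)
-- ===== Notes on version B (the rewrite author's own statement) =====
-- stated objective: alternative
-- what changed: Replaces the fused max-while-scanning counter with extracting the employee's column, run-length encoding it into maximal runs, and reducing to the longest run of value 2.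
import Mathlib
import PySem

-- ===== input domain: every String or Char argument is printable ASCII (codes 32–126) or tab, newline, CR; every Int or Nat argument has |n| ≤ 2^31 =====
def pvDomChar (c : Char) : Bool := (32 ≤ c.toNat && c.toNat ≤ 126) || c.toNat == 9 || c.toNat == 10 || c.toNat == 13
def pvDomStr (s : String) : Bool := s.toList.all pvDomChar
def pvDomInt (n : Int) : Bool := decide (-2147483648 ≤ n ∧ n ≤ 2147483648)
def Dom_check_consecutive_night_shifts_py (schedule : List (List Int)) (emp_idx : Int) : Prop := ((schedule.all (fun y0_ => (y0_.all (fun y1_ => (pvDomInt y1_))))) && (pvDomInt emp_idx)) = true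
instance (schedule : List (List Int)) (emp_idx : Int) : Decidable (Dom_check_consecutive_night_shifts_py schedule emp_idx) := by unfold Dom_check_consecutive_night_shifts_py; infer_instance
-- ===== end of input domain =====

-- B replaces the fused max-while-scanning counter with column extraction + run-length
-- encoding + a reduction over the run lengths (objective: alternative decomposition).

-- ===== PORT A =====
-- A's single fused scan: state (max_consecutive_night, current_consecutive_night).
-- day_schedule[emp_idx]: pyGet? (none = IndexError, excluded by Pre_; .getD 0 is unreachable there).
def check_consecutive_night_shifts_py (schedule : List (List Int)) (emp_idx : Int) : Int :=
  (schedule.foldl (fun (st : Int × Int) day_schedule =>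
      if (PySem.List.pyGet? day_schedule emp_idx).getD 0 = 2 then
        (max st.1 (st.2 + 1), st.2 + 1)
      else
        (st.1, 0)) (0, 0)).1

-- ===== PORT B =====
-- col = [day[emp_idx] for day in schedule]
def pvCol (schedule : List (List Int)) (emp_idx : Int) : List Int :=
  schedule.map (fun day_schedule => (PySem.List.pyGet? day_schedule emp_idx).getD 0)

-- one step of Source B's run-length loop: extend the last run or start a new one
def pvRleStep (runs : List (Int × Int)) (v : Int) : List (Int × Int) :=
  match runs.getLast? with
  | some (k, n) => if k = v then runs.dropLast ++ [(k, n + 1)] else runs ++ [(v, 1)]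
  | none => [(v, 1)]

-- max((n for v, n in runs if v == 2), default=0)
def pvMaxNight (runs : List (Int × Int)) : Int :=
  runs.foldl (fun acc p => if p.1 = 2 then max acc p.2 else acc) 0

def check_consecutive_night_shifts_py_alt (schedule : List (List Int)) (emp_idx : Int) : Int :=
  pvMaxNight ((pvCol schedule emp_idx).foldl pvRleStep [])

-- ===== PRECONDITION & SPEC =====
-- Pre_ excludes exactly the inputs where A raises IndexError: some day row on which emp_idx is out of range.
def Pre_check_consecutive_night_shifts_py (schedule : List (List Int)) (emp_idx : Int) : Prop :=
  ∀ day_schedule ∈ schedule, PySem.Raise.InRange day_schedule.length emp_idx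
instance (schedule : List (List Int)) (emp_idx : Int) : Decidable (Pre_check_consecutive_night_shifts_py schedule emp_idx) := by unfold Pre_check_consecutive_night_shifts_py; infer_instance

def pvWitness_check_consecutive_night_shifts_py : List (List Int) × Int := ([[2, 0], [2, 1], [0, 2]], 0)

def Spec_check_consecutive_night_shifts_py (schedule : List (List Int)) (emp_idx : Int) (out : Int) : Prop := out = check_consecutive_night_shifts_py_alt schedule emp_idx
instance (schedule : List (List Int)) (emp_idx : Int) (out : Int) : Decidable (Spec_check_consecutive_night_shifts_py schedule emp_idx out) := by unfold Spec_check_consecutive_night_shifts_py; infer_instance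

-- ===== CLAIM (what is proved, stated in full; the proofs are below) =====
def Claim_equal_check_consecutive_night_shifts_py : Prop := ∀ (schedule : List (List Int)) (emp_idx : Int), Dom_check_consecutive_night_shifts_py schedule emp_idx → Pre_check_consecutive_night_shifts_py schedule emp_idx → Spec_check_consecutive_night_shifts_py schedule emp_idx (check_consecutive_night_shifts_py schedule emp_idx)

-- ===== LEMMAS AND PROOFS =====

-- the length-if-night of the last run: this is what A's current counter tracks
def pvLast2 (runs : List (Int × Int)) : Int :=
  match runs.getLast? with
  | some (k, n) => if k = 2 then n else 0
  | none => 0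

-- A's step over a column value
def pvStepA (st : Int × Int) (v : Int) : Int × Int :=
  if v = 2 then (max st.1 (st.2 + 1), st.2 + 1) else (st.1, 0)

theorem pvMaxNight_append (xs : List (Int × Int)) (k n : Int) :
    pvMaxNight (xs ++ [(k, n)]) = if k = 2 then max (pvMaxNight xs) n else pvMaxNight xs := by
  simp [pvMaxNight, List.foldl_append]

theorem pv_invariant (col : List Int) :
    ∀ (m c : Int) (runs : List (Int × Int)),
      0 ≤ m → m = pvMaxNight runs → c = pvLast2 runs →
      (col.foldl pvStepA (m, c)).1 = pvMaxNight (col.foldl pvRleStep runs) := by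
  induction col with
  | nil => intro m c runs _ hm _; simpa using hm
  | cons v rest ih =>
    intro m c runs hm0 hm hc
    simp only [List.foldl_cons]
    rcases hlast : runs.getLast? with _ | ⟨k, n⟩
    · -- runs = []
      have hruns : runs = [] := List.getLast?_eq_none_iff.mp hlast
      subst hruns
      simp [pvMaxNight, pvLast2] at hm hc
      subst hm; subst hc
      by_cases hv : v = 2
      · subst hv
        have h1 : pvStepA ((0:Int), (0:Int)) 2 = (1, 1) := by decide
        have h2 : pvRleStep [] 2 = [(2, 1)] := by decide
        rw [h1, h2]
        exact ih 1 1 [(2, 1)] one_pos.le (by decide) (by decide)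
      · have h1 : pvStepA ((0:Int), (0:Int)) v = (0, 0) := by simp [pvStepA, hv]
        have h2 : pvRleStep [] v = [(v, 1)] := by simp [pvRleStep]
        rw [h1, h2]
        exact ih 0 0 [(v, 1)] le_rfl (by simp [pvMaxNight, hv]) (by simp [pvLast2, hv])
    · -- runs ends in (k, n)
      obtain ⟨pre, hpre⟩ : ∃ pre, runs = pre ++ [(k, n)] := by
        rcases List.eq_nil_or_concat runs with h | ⟨l, a, h⟩
        · simp [h] at hlast
        · subst h
          simp [List.getLast?_concat] at hlast
          exact ⟨l, by simp [hlast]⟩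
      have hdrop : runs.dropLast = pre := by simp [hpre]
      have hmval : m = if k = 2 then max (pvMaxNight pre) n else pvMaxNight pre := by
        rw [hm, hpre, pvMaxNight_append]
      have hcval : c = if k = 2 then n else 0 := by
        rw [hc]; simp [pvLast2, hlast]
      by_cases hv : v = 2
      · subst hv
        have hstepA : pvStepA (m, c) 2 = (max m (c + 1), c + 1) := by simp [pvStepA]
        rw [hstepA]
        by_cases hk : k = 2
        · subst hk
          have hstep : pvRleStep runs 2 = pre ++ [((2:Int), n + 1)] := by
            simp [pvRleStep, hlast, hdrop]
          rw [hstep]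
          rw [if_pos rfl] at hmval hcval
          refine ih _ _ _ (le_trans hm0 (le_max_left _ _)) ?_ ?_
          · rw [pvMaxNight_append, if_pos rfl]
            omega
          · simp [pvLast2, List.getLast?_concat]
            omega
        · have hstep : pvRleStep runs 2 = runs ++ [((2:Int), 1)] := by
            simp [pvRleStep, hlast, hk]
          rw [hstep]
          rw [if_neg hk] at hmval hcval
          refine ih _ _ _ (le_trans hm0 (le_max_left _ _)) ?_ ?_
          · rw [pvMaxNight_append, if_pos rfl, ← hm]
            omega
          · simp [pvLast2, List.getLast?_concat]
            omega
      · have hstepA : pvStepA (m, c) v = (m, 0) := by simp [pvStepA, hv]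
        rw [hstepA]
        by_cases hk : k = v
        · subst hk
          have hstep : pvRleStep runs k = pre ++ [(k, n + 1)] := by
            simp [pvRleStep, hlast, hdrop]
          rw [hstep]
          rw [if_neg hv] at hmval
          refine ih _ _ _ hm0 ?_ ?_
          · rw [pvMaxNight_append, if_neg hv]
            exact hmval
          · simp [pvLast2, List.getLast?_concat, hv]
        · have hstep : pvRleStep runs v = runs ++ [(v, 1)] := by
            simp [pvRleStep, hlast, hk]
          rw [hstep]
          refine ih _ _ _ hm0 ?_ ?_
          · rw [pvMaxNight_append, if_neg hv]
            exact hm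
          · simp [pvLast2, List.getLast?_concat, hv]

theorem pv_foldA_map (schedule : List (List Int)) (emp_idx : Int) :
    schedule.foldl (fun (st : Int × Int) day_schedule =>
        if (PySem.List.pyGet? day_schedule emp_idx).getD 0 = 2 then
          (max st.1 (st.2 + 1), st.2 + 1)
        else (st.1, 0)) (0, 0)
      = (pvCol schedule emp_idx).foldl pvStepA (0, 0) := by
  rw [pvCol, List.foldl_map]
  rfl

-- ===== VERDICT (by name: the statement is the Claim_ definition above) =====
theorem check_consecutive_night_shifts_py_spec : Claim_equal_check_consecutive_night_shifts_py := by
  intro schedule emp_idx _ _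
  unfold Spec_check_consecutive_night_shifts_py
  unfold check_consecutive_night_shifts_py check_consecutive_night_shifts_py_alt
  rw [pv_foldA_map]
  exact pv_invariant (pvCol schedule emp_idx) 0 0 [] le_rfl (by simp [pvMaxNight]) (by simp [pvLast2])
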